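-- pv_equiv track=rewrite | github.com/mantisbikr/fadebender | nlp-service/prompts/prompt_builder.py | _device_context
-- ===== SOURCE A (Python) =====
-- from typing import Any, Dict, List
--
-- def _device_context(known_devices: List[Dict[str, str]] | None) -> str:
--     if not known_devices:
--         return ""
--     by_type: Dict[str, List[str]] = {}
--     for device in known_devices:
--         dtype = device.get("type", "unknown")
--         name = device.get("name", "")
--         if name:
--             by_type.setdefault(dtype, []).append(name)
--     device_lines: List[str] = []
--     for dtype in sorted(by_type.keys()):
--         names = ", ".join(sorted(set(by_type[dtype]))[:10])
--         device_lines.append(f"  {dtype}: {names}")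
--     return (
--         "KNOWN DEVICES (from session presets):\n"
--         + "\n".join(device_lines)
--         + "\n\n"
--         + "**IMPORTANT**: These device names are ONLY for typo correction when the user EXPLICITLY mentions a device/plugin. "
--         + "DO NOT infer device operations from parameter names alone. "
--         + "For example: 'screamr gain' → 'Screamer' (user mentioned device), but 'set track 1 volume' → NO device (pure mixer op).\n\n"
--     )
-- ===== SOURCE B (Python) =====
-- def _device_context(known_devices):
--     if not known_devices:
--         return ""
--     pairs = [(d.get("type", "unknown"), d.get("name", "")) for d in known_devices]
--     pairs = [(t, n) for (t, n) in pairs if n]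
--     device_lines = [
--         "  {}: {}".format(t, ", ".join(sorted({n for (tt, n) in pairs if tt == t})[:10]))
--         for t in sorted({t for (t, _) in pairs})
--     ]
--     return (
--         "KNOWN DEVICES (from session presets):\n"
--         + "\n".join(device_lines)
--         + "\n\n"
--         + "**IMPORTANT**: These device names are ONLY for typo correction when the user EXPLICITLY mentions a device/plugin. "
--         + "DO NOT infer device operations from parameter names alone. "
--         + "For example: 'screamr gain' → 'Screamer' (user mentioned device), but 'set track 1 volume' → NO device (pure mixer op).\n\n"
--     )
-- ===== Notes on version B (the rewrite author's own statement) =====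
-- stated objective: simpler
-- what changed: Replaces the mutable dict-of-lists grouping (setdefault/append, then iterate sorted keys) with a flat filtered (type, name) pair list: the sorted distinct types are scanned directly and each line's names come from a per-type comprehension over the pairs, so no dict is built at all.
import Mathlib
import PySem

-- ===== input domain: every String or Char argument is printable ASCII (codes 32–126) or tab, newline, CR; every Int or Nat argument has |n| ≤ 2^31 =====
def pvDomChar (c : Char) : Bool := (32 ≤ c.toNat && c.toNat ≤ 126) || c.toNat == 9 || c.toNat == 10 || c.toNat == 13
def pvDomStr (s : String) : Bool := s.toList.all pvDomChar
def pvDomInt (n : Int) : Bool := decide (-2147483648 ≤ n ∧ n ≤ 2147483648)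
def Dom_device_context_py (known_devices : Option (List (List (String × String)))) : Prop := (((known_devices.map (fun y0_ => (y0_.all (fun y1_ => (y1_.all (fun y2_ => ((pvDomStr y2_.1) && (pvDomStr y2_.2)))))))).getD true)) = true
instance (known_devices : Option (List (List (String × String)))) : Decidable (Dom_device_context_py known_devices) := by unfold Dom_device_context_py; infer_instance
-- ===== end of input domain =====

-- B replaces A's mutable dict-of-lists grouping with a flat filtered (type, name) pair
-- list scanned per sorted distinct type — simpler decomposition, same return value.

def pvHeader : String := "KNOWN DEVICES (from session presets):\n"
def pvFooter : String := "\n\n**IMPORTANT**: These device names are ONLY for typo correction when the user EXPLICITLY mentions a device/plugin. DO NOT infer device operations from parameter names alone. For example: 'screamr gain' → 'Screamer' (user mentioned device), but 'set track 1 volume' → NO device (pure mixer op).\n\n"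

-- ===== PORT A =====
def device_context_py (known_devices : Option (List (List (String × String)))) : String :=
  match known_devices with
  | none => ""
  | some ds =>
    if ds.isEmpty then "" else
    let byType : PySem.Dict String (List String) :=
      ds.foldl (fun d device =>
        let dtype := (PySem.Dict.mk device).getD "type" "unknown"
        let name := (PySem.Dict.mk device).getD "name" ""
        -- setdefault(dtype, []).append(name) = modify with default []
        if name != "" then d.modify dtype [] (fun l => l ++ [name]) else d)
        PySem.Dict.empty
    let device_lines : List String :=
      (PySem.List.sorted byType.keys id).foldl (fun acc dtype =>
        let names := PySem.Str.join ", "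
          ((PySem.List.sorted ((PySem.Set.ofList (byType.getD dtype [])) : List String) id).take 10)
        acc ++ ["  " ++ dtype ++ ": " ++ names]) []
    pvHeader ++ PySem.Str.join "\n" device_lines ++ pvFooter

-- ===== PORT B =====
def device_context_py_alt (known_devices : Option (List (List (String × String)))) : String :=
  match known_devices with
  | none => ""
  | some ds =>
    if ds.isEmpty then "" else
    let pairs : List (String × String) :=
      (ds.map (fun device =>
        ((PySem.Dict.mk device).getD "type" "unknown",
         (PySem.Dict.mk device).getD "name" ""))).filter (fun p => p.2 != "")
    let device_lines : List String :=
      (PySem.List.sorted ((PySem.Set.ofList (pairs.map (fun p => p.1))) : List String) id).map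
        (fun t => "  " ++ t ++ ": " ++ PySem.Str.join ", "
          ((PySem.List.sorted
            ((PySem.Set.ofList ((pairs.filter (fun p => p.1 == t)).map (fun p => p.2))) : List String)
            id).take 10))
    pvHeader ++ PySem.Str.join "\n" device_lines ++ pvFooter

-- ===== PRECONDITION & SPEC =====
def Spec_device_context_py (known_devices : Option (List (List (String × String)))) (out : String) : Prop := out = device_context_py_alt known_devices
instance (known_devices : Option (List (List (String × String)))) (out : String) : Decidable (Spec_device_context_py known_devices out) := by unfold Spec_device_context_py; infer_instance

-- ===== CLAIM (what is proved, stated in full; the proofs are below) =====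
def Claim_equal_device_context_py : Prop := ∀ (known_devices : Option (List (List (String × String)))), Dom_device_context_py known_devices → Spec_device_context_py known_devices (device_context_py known_devices)

-- ===== LEMMAS AND PROOFS =====

-- A's conditional dict loop over the devices equals the unconditional modify loop over
-- B's filtered (type, name) pair list.
theorem pv_loop_eq (ds : List (List (String × String))) (d : PySem.Dict String (List String)) :
    ds.foldl (fun d device =>
        let dtype := (PySem.Dict.mk device).getD "type" "unknown"
        let name := (PySem.Dict.mk device).getD "name" ""
        if name != "" then d.modify dtype [] (fun l => l ++ [name]) else d) d
    = ((ds.map (fun device =>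
        ((PySem.Dict.mk device).getD "type" "unknown",
         (PySem.Dict.mk device).getD "name" ""))).filter (fun p => p.2 != "")).foldl
        (fun d p => d.modify p.1 [] (fun l => l ++ [p.2])) d := by
  induction ds generalizing d with
  | nil => rfl
  | cons dev rest ih =>
    simp only [List.foldl_cons, List.map_cons, List.filter_cons]
    by_cases h : ((PySem.Dict.mk dev).getD "name" "" != "") = true
    · rw [if_pos h, if_pos h, List.foldl_cons]
      exact ih _
    · rw [if_neg h, if_neg h]
      exact ih _

theorem device_context_py_spec : Claim_equal_device_context_py := by
  intro kd _
  unfold Spec_device_context_py device_context_py device_context_py_alt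
  cases kd with
  | none => rfl
  | some ds =>
    by_cases he : ds.isEmpty
    · simp [he]
    · simp only [he]
      rw [pv_loop_eq]
      set pairs : List (String × String) :=
        (ds.map (fun device =>
          ((PySem.Dict.mk device).getD "type" "unknown",
           (PySem.Dict.mk device).getD "name" ""))).filter (fun p => p.2 != "") with hp
      have hkeys :
          (pairs.foldl (fun d p => d.modify p.1 [] (fun l => l ++ [p.2]))
            (PySem.Dict.empty : PySem.Dict String (List String))).keys
          = PySem.Set.ofList (pairs.map (fun p => p.1)) := by
        rw [PySem.Dict.keys_foldl_modify_key pairs (fun p => p.1) [] (fun _ p => fun l => l ++ [p.2])]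
        rfl
      rw [hkeys]
      rw [PySem.List.foldl_append_singleton_eq_map, List.nil_append]
      have hmap :
          List.map
            (fun dtype => "  " ++ dtype ++ ": " ++ PySem.Str.join ", "
              (List.take 10 (PySem.List.sorted
                (PySem.Set.ofList
                  ((pairs.foldl (fun d p => d.modify p.1 [] (fun l => l ++ [p.2]))
                    (PySem.Dict.empty : PySem.Dict String (List String))).getD dtype []) : List String)
                id)))
            (PySem.List.sorted ((PySem.Set.ofList (pairs.map (fun p => p.1))) : List String) id)
          = List.map
            (fun t => "  " ++ t ++ ": " ++ PySem.Str.join ", "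
              (List.take 10 (PySem.List.sorted
                ((PySem.Set.ofList ((pairs.filter (fun p => p.1 == t)).map (fun p => p.2))) : List String)
                id)))
            (PySem.List.sorted ((PySem.Set.ofList (pairs.map (fun p => p.1))) : List String) id) := by
        apply List.map_congr_left
        intro t _
        have hget := PySem.Dict.getD_foldl_modify_append pairs
          (PySem.Dict.empty : PySem.Dict String (List String)) t
        simp only [show ((PySem.Dict.empty : PySem.Dict String (List String)).getD t []) = [] from rfl,
          List.nil_append] at hget
        rw [hget]
      rw [hmap]
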